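-- pv_equiv track=rewrite | github.com/gargsid1711/Artificial-Intelligence | mp3-code/naive_bayes.py | build_dictionaries
-- ===== SOURCE A (Python) =====
-- def build_dictionaries(train_set, train_labels):
--
--     pos_dict = {}
--     neg_dict = {}
--
--     for email_index in range(len(train_labels)):
--
--         each_email = train_set[email_index]
--         email_label = train_labels[email_index]
--
--         for each_word in each_email:
--             if email_label == 1:
--                 pos_dict[each_word] = pos_dict.get(each_word, 0) + 1
--             else:
--                 neg_dict[each_word] = neg_dict.get(each_word, 0) + 1
--
--     return pos_dict, neg_dict
-- ===== SOURCE B (Python) =====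
-- def build_dictionaries(train_set, train_labels):
--     pos_words = [w for i in range(len(train_labels)) if train_labels[i] == 1 for w in train_set[i]]
--     neg_words = [w for i in range(len(train_labels)) if train_labels[i] != 1 for w in train_set[i]]
--     def count_dict(words):
--         return {w: words.count(w) for w in words}
--     return count_dict(pos_words), count_dict(neg_words)
-- ===== Notes on version B (the rewrite author's own statement) =====
-- stated objective: alternative
-- what changed: Replaces A's single interleaved indexed pass (per-word if/else updating one of two accumulator dicts) by a partition-then-count decomposition: two comprehensions build the positive and negative word lists, then each dict is produced by a count-based dict comprehension with no incremental accumulator.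
import Mathlib
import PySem

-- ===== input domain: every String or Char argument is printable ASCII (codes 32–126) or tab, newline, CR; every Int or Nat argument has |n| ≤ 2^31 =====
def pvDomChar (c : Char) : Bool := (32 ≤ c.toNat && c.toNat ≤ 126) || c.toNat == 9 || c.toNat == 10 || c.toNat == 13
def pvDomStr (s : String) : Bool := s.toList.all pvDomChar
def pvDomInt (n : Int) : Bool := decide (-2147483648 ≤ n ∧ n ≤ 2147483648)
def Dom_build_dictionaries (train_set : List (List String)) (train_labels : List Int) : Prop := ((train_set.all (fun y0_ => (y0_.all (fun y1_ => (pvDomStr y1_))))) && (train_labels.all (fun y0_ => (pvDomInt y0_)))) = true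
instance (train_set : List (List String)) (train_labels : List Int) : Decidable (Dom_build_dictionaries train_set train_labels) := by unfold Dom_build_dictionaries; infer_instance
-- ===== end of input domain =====

-- B replaces A's single interleaved indexed pass (per-word branch updating one of two dicts) by a
-- partition-then-count decomposition: two filtered word lists built by comprehensions, each turned
-- into a dict by a count-based dict comprehension (objective: alternative decomposition, not faster).

-- ===== PORT A =====
def build_dictionaries (train_set : List (List String)) (train_labels : List Int) : (List (String × Int)) × (List (String × Int)) :=
  let r := (PySem.List.pyRange 0 train_labels.length 1).foldl
    (fun st i =>
      let each_email := (PySem.List.pyGet? train_set i).getD []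
      let email_label := (PySem.List.pyGet? train_labels i).getD 0
      each_email.foldl
        (fun st each_word =>
          if email_label == 1 then
            (st.1.insert each_word (st.1.getD each_word 0 + 1), st.2)
          else
            (st.1, st.2.insert each_word (st.2.getD each_word 0 + 1)))
        st)
    ((PySem.Dict.empty : PySem.Dict String Int), (PySem.Dict.empty : PySem.Dict String Int))
  (r.1.items, r.2.items)

-- ===== PORT B =====
-- Source B's count_dict helper: {w: words.count(w) for w in words}
def pvCountDict (words : List String) : PySem.Dict String Int :=
  words.foldl (fun d w => d.insert w ((words.count w : Int))) PySem.Dict.empty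

def build_dictionaries_alt (train_set : List (List String)) (train_labels : List Int) : (List (String × Int)) × (List (String × Int)) :=
  let idx := PySem.List.pyRange 0 train_labels.length 1
  let pos_words := (idx.filter (fun i => (PySem.List.pyGet? train_labels i).getD 0 == 1)).flatMap
      (fun i => (PySem.List.pyGet? train_set i).getD [])
  let neg_words := (idx.filter (fun i => !((PySem.List.pyGet? train_labels i).getD 0 == 1))).flatMap
      (fun i => (PySem.List.pyGet? train_set i).getD [])
  ((pvCountDict pos_words).items, (pvCountDict neg_words).items)

-- ===== PRECONDITION & SPEC =====
-- Pre_ excludes exactly the inputs where Python A raises IndexError (train_set shorter than train_labels).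
def Pre_build_dictionaries (train_set : List (List String)) (train_labels : List Int) : Prop :=
  train_labels.length ≤ train_set.length
instance (train_set : List (List String)) (train_labels : List Int) : Decidable (Pre_build_dictionaries train_set train_labels) := by unfold Pre_build_dictionaries; infer_instance
def pvWitness_build_dictionaries : List (List String) × List Int := ([["spam", "ham"], ["spam"]], [1, 0])

def Spec_build_dictionaries (train_set : List (List String)) (train_labels : List Int) (out : (List (String × Int)) × (List (String × Int))) : Prop := out = build_dictionaries_alt train_set train_labels
instance (train_set : List (List String)) (train_labels : List Int) (out : (List (String × Int)) × (List (String × Int))) : Decidable (Spec_build_dictionaries train_set train_labels out) := by unfold Spec_build_dictionaries; infer_instance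

-- ===== CLAIM (what is proved, stated in full; the proofs are below) =====
def Claim_equal_build_dictionaries : Prop := ∀ (train_set : List (List String)) (train_labels : List Int), Dom_build_dictionaries train_set train_labels → Pre_build_dictionaries train_set train_labels → Spec_build_dictionaries train_set train_labels (build_dictionaries train_set train_labels)

-- ===== LEMMAS AND PROOFS =====

-- inner word loop when the label test is true: only the first dict moves
theorem pvFoldTrue (email : List String) (pd nd : PySem.Dict String Int) :
    email.foldl (fun st w => ((st.1.insert w (st.1.getD w 0 + 1) : PySem.Dict String Int), st.2)) (pd, nd)
      = (email.foldl (fun d w => d.insert w (d.getD w 0 + 1)) pd, nd) := by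
  induction email generalizing pd with
  | nil => rfl
  | cons w ws ih => simp only [List.foldl_cons, ih]

theorem pvFoldFalse (email : List String) (pd nd : PySem.Dict String Int) :
    email.foldl (fun st w => (st.1, (st.2.insert w (st.2.getD w 0 + 1) : PySem.Dict String Int))) (pd, nd)
      = (pd, email.foldl (fun d w => d.insert w (d.getD w 0 + 1)) nd) := by
  induction email generalizing nd with
  | nil => rfl
  | cons w ws ih => simp only [List.foldl_cons, ih]

-- A's interleaved pass over an index list splits into two independent counting folds
theorem pvSplit (train_set : List (List String)) (train_labels : List Int)
    (I : List Int) (pd nd : PySem.Dict String Int) :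
    I.foldl
      (fun st i =>
        ((PySem.List.pyGet? train_set i).getD []).foldl
          (fun st each_word =>
            if (PySem.List.pyGet? train_labels i).getD 0 == 1 then
              (st.1.insert each_word (st.1.getD each_word 0 + 1), st.2)
            else
              (st.1, st.2.insert each_word (st.2.getD each_word 0 + 1)))
          st) (pd, nd)
    = (((I.filter (fun i => (PySem.List.pyGet? train_labels i).getD 0 == 1)).flatMap
          (fun i => (PySem.List.pyGet? train_set i).getD [])).foldl
            (fun d w => d.insert w (d.getD w 0 + 1)) pd,
       ((I.filter (fun i => !((PySem.List.pyGet? train_labels i).getD 0 == 1))).flatMap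
          (fun i => (PySem.List.pyGet? train_set i).getD [])).foldl
            (fun d w => d.insert w (d.getD w 0 + 1)) nd) := by
  induction I generalizing pd nd with
  | nil => rfl
  | cons i I ih =>
    simp only [List.foldl_cons, List.filter_cons]
    cases h : ((PySem.List.pyGet? train_labels i).getD 0 == 1) with
    | true =>
      simp only [Bool.not_true, Bool.false_eq_true, if_true, if_false, List.flatMap_cons]
      rw [pvFoldTrue, ih, List.foldl_append]
    | false =>
      simp only [Bool.not_false, Bool.false_eq_true, if_true, if_false, List.flatMap_cons]
      rw [pvFoldFalse, ih, List.foldl_append]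

-- the value stored by a constant-per-key insertion loop
theorem pvGetDFoldlInsertConst (v : String → Int) (ws : List String)
    (d : PySem.Dict String Int) (k : String) (d0 : Int) :
    (ws.foldl (fun d w => d.insert w (v w)) d).getD k d0
      = if k ∈ ws then v k else d.getD k d0 := by
  induction ws generalizing d with
  | nil => simp
  | cons w ws ih =>
    simp only [List.foldl_cons, ih, PySem.Dict.getD_insert, List.mem_cons]
    by_cases h1 : k ∈ ws <;> by_cases h2 : k = w <;> simp [h1, h2]

-- Source B's dict comprehension {w: ws.count(w) for w in ws} equals the incremental counting fold
theorem pvCountDict_eq (ws : List String) :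
    pvCountDict ws = ws.foldl (fun d w => d.insert w (d.getD w 0 + 1)) PySem.Dict.empty := by
  apply PySem.Dict.ext
  have hk1 : (pvCountDict ws).keys = PySem.Set.update (PySem.Dict.empty : PySem.Dict String Int).keys ws := by
    unfold pvCountDict; exact PySem.Dict.keys_foldl_insert ws _ _
  have hk2 : (ws.foldl (fun d w => d.insert w (d.getD w 0 + 1)) (PySem.Dict.empty : PySem.Dict String Int)).keys
      = PySem.Set.update (PySem.Dict.empty : PySem.Dict String Int).keys ws := PySem.Dict.keys_foldl_insert ws _ _
  have hn1 : (pvCountDict ws).keys.Nodup := by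
    unfold pvCountDict; exact PySem.Dict.nodup_keys_foldl_insert ws _ _ PySem.Dict.nodup_keys_empty
  have hn2 : (ws.foldl (fun d w => d.insert w (d.getD w 0 + 1)) (PySem.Dict.empty : PySem.Dict String Int)).keys.Nodup :=
    PySem.Dict.nodup_keys_foldl_insert ws _ _ PySem.Dict.nodup_keys_empty
  rw [PySem.Dict.items_eq_map_keys (pvCountDict ws) hn1 0,
    PySem.Dict.items_eq_map_keys (ws.foldl (fun d w => d.insert w (d.getD w 0 + 1)) (PySem.Dict.empty : PySem.Dict String Int)) hn2 0,
    hk1, hk2]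
  apply List.map_congr_left
  intro k _
  have h1 : (pvCountDict ws).getD k 0 = (ws.count k : Int) := by
    unfold pvCountDict
    rw [pvGetDFoldlInsertConst]
    by_cases h : k ∈ ws
    · simp [h]
    · simp [h, List.count_eq_zero.2 h]
  have h2 : (ws.foldl (fun d w => d.insert w (d.getD w 0 + 1)) (PySem.Dict.empty : PySem.Dict String Int)).getD k 0
      = (ws.count k : Int) := by
    rw [PySem.Dict.getD_foldl_insert_add_one]
    simp
  rw [h1, h2]

-- ===== VERDICT (by name: the statement is the Claim_ definition above) =====
theorem build_dictionaries_spec : Claim_equal_build_dictionaries := by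
  intro train_set train_labels _ _
  unfold Spec_build_dictionaries build_dictionaries build_dictionaries_alt
  simp only [pvSplit, pvCountDict_eq]
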